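-- pv_equiv track=rewrite | github.com/lusoris/vmaf | tools/vmaf-tune/src/vmaftune/score_backend.py | parse_supported_backends
-- ===== SOURCE A (Python) =====
-- ALL_BACKENDS: tuple[str, ...] = ("cpu", "cuda", "sycl", "vulkan")
--
-- def parse_supported_backends(help_text: str) -> frozenset[str]:
--     """Extract the backends the vmaf binary advertises from `--help`.
--
--     The fork's CLI prints a line like::
--
--         --backend $name:              exclusive backend selector — auto|cpu|cuda|sycl|vulkan.
--
--     We parse the alternation (``a|b|c``) and intersect it with
--     `ALL_BACKENDS`. ``cpu`` is added unconditionally — every build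
--     has a CPU path, even if the help line is missing.
--
--     Returns a frozenset for cheap membership tests.
--     """
--     found: set[str] = {"cpu"}
--     for backend in ALL_BACKENDS:
--         # Look for the exact token surrounded by | or whitespace as
--         # a robust check; matches any of: auto|cpu|cuda|sycl|vulkan
--         # without false-positives on substrings (e.g. "cuda" inside
--         # a comment about CUDA).
--         for needle in (f"|{backend}|", f"|{backend}.", f"|{backend}\n", f"|{backend} "):
--             if needle in help_text:
--                 found.add(backend)
--                 break
--     return frozenset(found)
-- ===== SOURCE B (Python) =====
-- ALL_BACKENDS: tuple[str, ...] = ("cpu", "cuda", "sycl", "vulkan")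
--
-- _DELIMS = "|.\n "
--
-- def parse_supported_backends(help_text: str) -> frozenset[str]:
--     # Single left-to-right tokenizer pass: at each '|' try to read one
--     # backend name followed (without consuming it) by a delimiter char.
--     hits: set[str] = set()
--     i = 0
--     n = len(help_text)
--     while i < n:
--         if help_text[i] == "|":
--             for t in ALL_BACKENDS:
--                 j = i + 1 + len(t)
--                 if help_text.startswith(t, i + 1) and j < n and help_text[j] in _DELIMS:
--                     hits.add(t)
--                     i = j - 1  # resume at the delimiter
--                     break
--         i += 1
--     # intersect with the canonical backend list; cpu is always supported
--     return frozenset(b for b in ALL_BACKENDS if b == "cpu" or b in hits)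
-- ===== Notes on version B (the rewrite author's own statement) =====
-- stated objective: alternative
-- what changed: Replaces A's per-backend needle loop (4 backends x 4 needles, each a full substring search of the help text) by a single left-to-right tokenizer pass that at each pipe character tries to read one backend name with a one-character delimiter lookahead, then intersects the hits with ALL_BACKENDS (cpu always included).
import Mathlib
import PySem

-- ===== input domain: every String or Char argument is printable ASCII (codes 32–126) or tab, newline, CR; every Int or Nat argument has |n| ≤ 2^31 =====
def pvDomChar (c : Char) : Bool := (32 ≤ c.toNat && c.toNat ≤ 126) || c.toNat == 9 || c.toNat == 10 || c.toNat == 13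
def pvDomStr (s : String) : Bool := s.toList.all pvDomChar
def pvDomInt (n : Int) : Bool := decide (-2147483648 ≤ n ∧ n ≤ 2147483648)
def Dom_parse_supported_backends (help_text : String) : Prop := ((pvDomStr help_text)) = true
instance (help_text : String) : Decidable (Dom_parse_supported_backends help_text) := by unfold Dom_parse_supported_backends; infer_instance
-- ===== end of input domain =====

-- B replaces A's sixteen full substring scans by one left-to-right tokenizer pass (alternative decomposition, same result).

-- ===== PORT A =====
-- ALL_BACKENDS = ("cpu", "cuda", "sycl", "vulkan")
def pvALL : List String := ["cpu", "cuda", "sycl", "vulkan"]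

-- the four needles f"|{b}|", f"|{b}.", f"|{b}\n", f"|{b} " (as char lists; exact model of the f-strings)
def pvNeedlesA (b : List Char) : List (List Char) :=
  ['|' :: b ++ ['|'], '|' :: b ++ ['.'], '|' :: b ++ ['\n'], '|' :: b ++ [' ']]

-- port of A: fold over ALL_BACKENDS; the inner `for … break` is `any` over the needle tuple
def parse_supported_backends (help_text : String) : List String :=
  pvALL.foldl
    (fun found backend =>
      if (pvNeedlesA backend.toList).any (fun n => PySem.Chars.isIn n help_text.toList) then
        PySem.Set.add found backend
      else found)
    (PySem.Set.ofList ["cpu"])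

-- ===== PORT B =====
def pvDelims : List Char := ['|', '.', '\n', ' ']

def pvTokens : List (List Char) := ["cpu".toList, "cuda".toList, "sycl".toList, "vulkan".toList]

-- `j < n and help_text[j] in "|.\n "` on the remaining suffix
def pvHeadDelim : List Char → Bool
  | [] => false
  | c :: _ => pvDelims.contains c

-- the while-loop of B as recursion on the remaining suffix: at '|' try to read one
-- backend token followed by an unconsumed delimiter, else advance one char
def pvScan (cs : List Char) : List (List Char) :=
  match cs with
  | [] => []
  | c :: rest =>
    if c = '|' then
      match pvTokens.find? (fun t => t.isPrefixOf rest && pvHeadDelim (rest.drop t.length)) with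
      | some t => t :: pvScan (rest.drop t.length)
      | none => pvScan rest
    else pvScan rest
termination_by cs.length
decreasing_by
  all_goals simp [List.length_drop]

def parse_supported_backends_alt (help_text : String) : List String :=
  let hits : PySem.Set (List Char) := PySem.Set.ofList (pvScan help_text.toList)
  PySem.Set.ofList (pvALL.filter (fun b => b == "cpu" || PySem.Set.contains hits b.toList))

-- ===== PRECONDITION & SPEC =====
def Spec_parse_supported_backends (help_text : String) (out : List String) : Prop := out = parse_supported_backends_alt help_text
instance (help_text : String) (out : List String) : Decidable (Spec_parse_supported_backends help_text out) := by unfold Spec_parse_supported_backends; infer_instance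

-- ===== CLAIM (what is proved, stated in full; the proofs are below) =====
def Claim_equal_parse_supported_backends : Prop := ∀ (help_text : String), Dom_parse_supported_backends help_text → Spec_parse_supported_backends help_text (parse_supported_backends help_text)

-- ===== LEMMAS AND PROOFS =====

-- "some needle |t·d occurs in cs", the condition both programs decide for a token t
def pvHasTok (t cs : List Char) : Prop := ∃ d ∈ pvDelims, ('|' :: (t ++ [d])) <:+: cs

lemma pv_tokens_nobar : ∀ t ∈ pvTokens, '|' ∉ t := by decide

lemma pv_tokens_nonprefix : ∀ t ∈ pvTokens, ∀ t' ∈ pvTokens, t <+: t' → t = t' := by decide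

-- an occurrence of '|'::l' inside u ++ tail with '|' ∉ u lies inside tail
lemma pv_infix_past_clean (u : List Char) : ∀ tail l' : List Char, '|' ∉ u →
    ('|' :: l') <:+: (u ++ tail) → ('|' :: l') <:+: tail := by
  induction u with
  | nil => intro tail l' _ h; simpa using h
  | cons a u ih =>
    intro tail l' hu h
    rcases List.infix_cons_iff.mp h with hp | hi
    · have : '|' = a := (List.cons_prefix_cons.mp hp).1
      exact absurd (this ▸ List.mem_cons_self) (fun hmem => hu hmem)
    · exact ih tail l' (fun hm => hu (List.mem_cons_of_mem _ hm)) hi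

-- main invariant of the scan: t is collected iff some needle for t occurs
lemma pv_scan_iff (t : List Char) (htok : t ∈ pvTokens) :
    ∀ cs : List Char, (t ∈ pvScan cs ↔ pvHasTok t cs) := by
  intro cs
  induction cs using pvScan.induct with
  | case1 =>
    simp only [pvScan, List.not_mem_nil, false_iff, pvHasTok]
    rintro ⟨d, _, h⟩
    exact absurd (List.eq_nil_of_infix_nil h) (by simp)
  | case2 rest t' hfind ih =>
    have ht'tok : t' ∈ pvTokens := List.mem_of_find?_eq_some hfind
    have hpred := List.find?_some hfind
    rw [Bool.and_eq_true] at hpred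
    have hpre : t' <+: rest := List.isPrefixOf_iff_prefix.mp hpred.1
    have hdel0 := hpred.2
    obtain ⟨tail, rfl⟩ := hpre
    have hdrop : (t' ++ tail).drop t'.length = tail := by simp
    rw [hdrop] at hdel0 ih
    rw [pvScan]
    simp only [hfind, hdrop]
    constructor
    · intro hm
      rcases List.mem_cons.mp hm with rfl | hm'
      · cases tail with
        | nil => simp [pvHeadDelim] at hdel0
        | cons d tail' =>
          refine ⟨d, by simpa [pvHeadDelim] using hdel0, ?_⟩
          exact ⟨[], tail', by simp⟩
      · rcases ih.mp hm' with ⟨d, hd, hinf⟩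
        exact ⟨d, hd, hinf.trans ⟨'|' :: t', [], by simp⟩⟩
    · rintro ⟨d, hd, hinf⟩
      rcases List.infix_cons_iff.mp hinf with hp | hi
      · -- occurrence at the front: prefix-freeness forces t = t'
        have hpt : t ++ [d] <+: t' ++ tail := (List.cons_prefix_cons.mp hp).2
        have hpt' : t <+: t' ++ tail := (List.prefix_append t [d]).trans hpt
        have : t = t' := by
          rcases List.prefix_or_prefix_of_prefix hpt' (List.prefix_append t' tail) with h1 | h1
          · exact pv_tokens_nonprefix t htok t' ht'tok h1
          · exact (pv_tokens_nonprefix t' ht'tok t htok h1).symm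
        exact List.mem_cons.mpr (Or.inl this)
      · have := pv_infix_past_clean t' tail _ (pv_tokens_nobar t' ht'tok) hi
        exact List.mem_cons.mpr (Or.inr (ih.mpr ⟨d, hd, this⟩))
  | case3 rest hfind ih =>
    rw [pvScan]
    simp only [hfind]
    constructor
    · intro hm
      rcases ih.mp hm with ⟨d, hd, hinf⟩
      exact ⟨d, hd, hinf.trans ⟨['|'], [], by simp⟩⟩
    · rintro ⟨d, hd, hinf⟩
      rcases List.infix_cons_iff.mp hinf with hp | hi
      · -- would be a match at this position: contradicts find? = none
        have hpr : (t ++ [d]) <+: rest := (List.cons_prefix_cons.mp hp).2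
        have hpt : t <+: rest := (List.prefix_append t [d]).trans hpr
        obtain ⟨tail, rfl⟩ := hpr
        have hnone := List.find?_eq_none.mp hfind t htok
        have h1 : t.isPrefixOf (t ++ [d] ++ tail) = true :=
          List.isPrefixOf_iff_prefix.mpr (by simpa using hpt)
        have h2 : pvHeadDelim ((t ++ [d] ++ tail).drop t.length) = true := by
          have hh : (t ++ [d] ++ tail).drop t.length = d :: tail := by simp
          rw [hh]
          show pvDelims.contains d = true
          exact List.contains_iff_mem.mpr hd
        rw [h1, h2] at hnone
        simp at hnone
      · exact ih.mpr ⟨d, hd, hi⟩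
  | case4 c rest hc ih =>
    rw [pvScan, if_neg hc]
    constructor
    · intro hm
      rcases ih.mp hm with ⟨d, hd, hinf⟩
      exact ⟨d, hd, hinf.trans ⟨[c], [], by simp⟩⟩
    · rintro ⟨d, hd, hinf⟩
      rcases List.infix_cons_iff.mp hinf with hp | hi
      · exact absurd ((List.cons_prefix_cons.mp hp).1).symm hc
      · exact ih.mpr ⟨d, hd, hi⟩

-- A's needle test decides pvHasTok
lemma pv_condA_iff (b cs : List Char) :
    ((pvNeedlesA b).any (fun n => PySem.Chars.isIn n cs) = true) ↔ pvHasTok b cs := by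
  simp only [pvNeedlesA, pvDelims, pvHasTok, List.any_cons, List.any_nil, Bool.or_eq_true,
    Bool.false_eq_true, or_false, PySem.Chars.isIn_iff_infix, List.mem_cons, List.not_mem_nil]
  constructor
  · rintro (h | h | h | h)
    · exact ⟨'|', by simp, by simpa using h⟩
    · exact ⟨'.', by simp, by simpa using h⟩
    · exact ⟨'\n', by simp, by simpa using h⟩
    · exact ⟨' ', by simp, by simpa using h⟩
  · rintro ⟨d, hd, h⟩
    rcases hd with rfl | rfl | rfl | rfl | h' <;> simp_all

-- the membership test both programs perform for a token, as one boolean equation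
lemma pv_cond_eq (b : String) (hb : b.toList ∈ pvTokens) (s : List Char) :
    ((pvNeedlesA b.toList).any (fun n => PySem.Chars.isIn n s))
      = PySem.Set.contains (PySem.Set.ofList (pvScan s)) b.toList := by
  by_cases h : pvHasTok b.toList s
  · rw [(pv_condA_iff _ _).mpr h]
    have hmem : b.toList ∈ pvScan s := (pv_scan_iff b.toList hb s).mpr h
    have : PySem.Set.contains (PySem.Set.ofList (pvScan s)) b.toList = true := by
      simp [PySem.Set.contains, PySem.Set.mem_ofList, hmem]
    rw [this]
  · have h1 : ((pvNeedlesA b.toList).any (fun n => PySem.Chars.isIn n s)) = false :=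
      Bool.eq_false_iff.mpr (fun h' => h ((pv_condA_iff _ _).mp h'))
    have h2 : PySem.Set.contains (PySem.Set.ofList (pvScan s)) b.toList = false :=
      Bool.eq_false_iff.mpr (fun h' => h ((pv_scan_iff b.toList hb s).mp
        (by simpa [PySem.Set.contains, PySem.Set.mem_ofList] using h')))
    rw [h1, h2]

-- ===== VERDICT (by name: the statement is the Claim_ definition above) =====
theorem parse_supported_backends_spec : Claim_equal_parse_supported_backends := by
  intro help_text _
  unfold Spec_parse_supported_backends
  have e2 := pv_cond_eq "cuda" (by decide) help_text.toList
  have e3 := pv_cond_eq "sycl" (by decide) help_text.toList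
  have e4 := pv_cond_eq "vulkan" (by decide) help_text.toList
  unfold parse_supported_backends parse_supported_backends_alt pvALL
  rcases Bool.eq_false_or_eq_true (PySem.Set.contains (PySem.Set.ofList (pvScan help_text.toList)) "cuda".toList) with h2 | h2 <;>
  rcases Bool.eq_false_or_eq_true (PySem.Set.contains (PySem.Set.ofList (pvScan help_text.toList)) "sycl".toList) with h3 | h3 <;>
  rcases Bool.eq_false_or_eq_true (PySem.Set.contains (PySem.Set.ofList (pvScan help_text.toList)) "vulkan".toList) with h4 | h4 <;>
  rcases Bool.eq_false_or_eq_true ((pvNeedlesA "cpu".toList).any (fun n => PySem.Chars.isIn n help_text.toList)) with h1 | h1 <;>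
  simp only [List.foldl, List.filter, e2, e3, e4, h1, h2, h3, h4] <;> simp <;> decide
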